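-- pv_equiv track=rewrite | github.com/andrescabrera83/diariospdf | app.py | divide_into_chunks
-- ===== SOURCE A (Python) =====
-- def divide_into_chunks(total_pages, num_chunks):
--     """
--     Divide the total number of pages into chunks, adjusting for the remainder.
--
--     Args:
--         total_pages (int): Total number of pages in the PDF file.
--         num_chunks (int): Number of chunks to divide the pages into.
--
--     Returns:
--         list: List of tuples containing the start and end page numbers of each chunk.
--     """
--     chunk_size = total_pages // num_chunks
--     remainder = total_pages % num_chunks  # Calculate the remainder
--     chunks = []
--     start_page = 1
--     for i in range(num_chunks):
--         end_page = start_page + chunk_size - 1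
--         if i < remainder:
--             end_page += 1  # Distribute the remainder pages among the first few chunks
--         chunks.append((start_page, end_page))
--         start_page = end_page + 1
--     return chunks
-- ===== SOURCE B (Python) =====
-- def divide_into_chunks(total_pages, num_chunks):
--     chunk_size = total_pages // num_chunks
--     remainder = total_pages % num_chunks
--     return [
--         (1 + i * chunk_size + min(i, remainder),
--          i * chunk_size + min(i, remainder) + chunk_size + (1 if i < remainder else 0))
--         for i in range(num_chunks)
--     ]
-- ===== Notes on version B (the rewrite author's own statement) =====
-- stated objective: simpler
-- what changed: Replaces the sequential start_page accumulator with a stateless closed-form per index (start = 1 + i*chunk_size + min(i, remainder)), built as a list comprehension.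
import Mathlib
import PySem

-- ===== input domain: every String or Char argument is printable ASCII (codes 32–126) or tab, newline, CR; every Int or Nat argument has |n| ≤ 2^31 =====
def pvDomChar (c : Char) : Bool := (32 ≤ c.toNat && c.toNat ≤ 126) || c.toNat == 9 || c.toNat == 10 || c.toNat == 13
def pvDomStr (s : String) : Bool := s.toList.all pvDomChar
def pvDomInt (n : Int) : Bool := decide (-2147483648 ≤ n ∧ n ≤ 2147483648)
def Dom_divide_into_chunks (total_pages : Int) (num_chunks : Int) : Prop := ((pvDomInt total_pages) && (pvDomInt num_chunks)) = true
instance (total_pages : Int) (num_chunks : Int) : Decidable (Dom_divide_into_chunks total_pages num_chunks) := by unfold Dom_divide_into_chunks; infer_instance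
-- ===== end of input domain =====

-- B replaces A's running start_page accumulator with a stateless closed-form per chunk index (simpler decomposition, same O(n) cost).


-- ===== PORT A =====
-- A's loop: state (chunks, start_page), one step per i in range(num_chunks)
def divide_into_chunks (total_pages : Int) (num_chunks : Int) : List (Int × Int) :=
  let chunk_size := PySem.Int.floordiv total_pages num_chunks
  let remainder := PySem.Int.mod total_pages num_chunks
  let st := (PySem.List.pyRange 0 num_chunks 1).foldl
    (fun (st : List (Int × Int) × Int) i =>
      let end_page := st.2 + chunk_size - 1
      let end_page := if i < remainder then end_page + 1 else end_page
      (st.1 ++ [(st.2, end_page)], end_page + 1))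
    ([], 1)
  st.1

-- ===== PORT B =====
def divide_into_chunks_alt (total_pages : Int) (num_chunks : Int) : List (Int × Int) :=
  let chunk_size := PySem.Int.floordiv total_pages num_chunks
  let remainder := PySem.Int.mod total_pages num_chunks
  (PySem.List.pyRange 0 num_chunks 1).map (fun i =>
    (1 + i * chunk_size + min i remainder,
     i * chunk_size + min i remainder + chunk_size + (if i < remainder then 1 else 0)))

-- ===== PRECONDITION & SPEC =====
-- Pre_ excludes num_chunks = 0, where A raises ZeroDivisionError.
def Pre_divide_into_chunks (total_pages : Int) (num_chunks : Int) : Prop := num_chunks ≠ 0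
instance (total_pages : Int) (num_chunks : Int) : Decidable (Pre_divide_into_chunks total_pages num_chunks) := by unfold Pre_divide_into_chunks; infer_instance
def pvWitness_divide_into_chunks : Int × Int := (10, 3)

def Spec_divide_into_chunks (total_pages : Int) (num_chunks : Int) (out : List (Int × Int)) : Prop := out = divide_into_chunks_alt total_pages num_chunks
instance (total_pages : Int) (num_chunks : Int) (out : List (Int × Int)) : Decidable (Spec_divide_into_chunks total_pages num_chunks out) := by unfold Spec_divide_into_chunks; infer_instance

-- ===== CLAIM (what is proved, stated in full; the proofs are below) =====
def Claim_equal_divide_into_chunks : Prop := ∀ (total_pages : Int) (num_chunks : Int), Dom_divide_into_chunks total_pages num_chunks → Pre_divide_into_chunks total_pages num_chunks → Spec_divide_into_chunks total_pages num_chunks (divide_into_chunks total_pages num_chunks)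

-- ===== LEMMAS AND PROOFS =====

-- Invariant: after folding A's step over range 0..n-1, the accumulated list is B's map
-- and the running start_page equals the closed form 1 + n*cs + min n r.
theorem dic_fold_invariant (cs r : Int) (hr : 0 ≤ r) (n : Nat) :
    ((PySem.List.pyRange 0 (n : Int) 1).foldl
      (fun (st : List (Int × Int) × Int) i =>
        let end_page := st.2 + cs - 1
        let end_page := if i < r then end_page + 1 else end_page
        (st.1 ++ [(st.2, end_page)], end_page + 1))
      ([], 1))
    = ((PySem.List.pyRange 0 (n : Int) 1).map (fun i =>
        (1 + i * cs + min i r,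
         i * cs + min i r + cs + (if i < r then 1 else 0))),
       1 + (n : Int) * cs + min (n : Int) r) := by
  induction n with
  | zero => simp; omega
  | succ m ih =>
    rw [show ((m + 1 : Nat) : Int) = (m : Int) + 1 by push_cast; ring,
        PySem.List.pyRange_one_succ_right (by positivity)]
    rw [List.foldl_append, List.map_append, ih]
    simp only [List.foldl_cons, List.foldl_nil, List.map_cons, List.map_nil, Prod.mk.injEq]
    refine ⟨?_, ?_⟩
    · congr 1
      by_cases hm : (m : Int) < r <;> simp [hm] <;> ring
    · by_cases hm : (m : Int) < r
      · have h1 : min ((m : Int)) r = (m : Int) := by omega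
        have h2 : min ((m : Int) + 1) r = (m : Int) + 1 := by omega
        rw [h2]
        simp [hm, h1]
        ring
      · have h1 : min ((m : Int)) r = r := by omega
        have h2 : min ((m : Int) + 1) r = r := by omega
        simp [hm, h1, h2]; ring

-- ===== VERDICT (by name: the statement is the Claim_ definition above) =====
theorem divide_into_chunks_spec : Claim_equal_divide_into_chunks := by
  intro tp nc _ _
  unfold Spec_divide_into_chunks divide_into_chunks divide_into_chunks_alt
  by_cases h : nc ≤ 0
  · simp [PySem.List.pyRange_one_eq_nil h]
  · rw [not_le] at h
    obtain ⟨n, hn⟩ : ∃ n : Nat, nc = (n : Int) := ⟨nc.toNat, by omega⟩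
    subst hn
    have hr : 0 ≤ PySem.Int.mod tp (n : Int) := PySem.Int.mod_nonneg tp h
    dsimp only
    rw [dic_fold_invariant _ _ hr n]
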